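-- pv_equiv track=rewrite | github.com/jgmsp/mspage-gcon | mspage_gcon/pipeline.py | _choose_status
-- ===== SOURCE A (Python) =====
-- def _choose_status(group_rows: list[dict]) -> str | None:
--     priorities = {
--         "Cancelled": 5,
--         "Delayed": 4,
--         "Boarding": 3,
--         "On Time": 2,
--         "Departed": 1,
--     }
--     statuses = [_clean_string(row.get("status")) for row in group_rows]
--     statuses = [status for status in statuses if status]
--     if not statuses:
--         return None
--     return max(statuses, key=lambda status: priorities.get(status, 0))
--
-- def _clean_string(value: object) -> str | None:
--     if value is None:
--         return None
--     text = str(value).strip()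
--     return text or None
-- ===== SOURCE B (Python) =====
-- def _choose_status(group_rows: list[dict]) -> str | None:
--     statuses = []
--     for row in group_rows:
--         value = row.get("status")
--         if value is not None:
--             text = str(value).strip()
--             if text:
--                 statuses.append(text)
--     if not statuses:
--         return None
--     present = set(statuses)
--     for name in ("Cancelled", "Delayed", "Boarding", "On Time", "Departed"):
--         if name in present:
--             return name
--     return statuses[0]
-- ===== Notes on version B (the rewrite author's own statement) =====
-- stated objective: idiomatic
-- what changed: Replaces the priority dict plus max(key=...) with a single cleaning pass, a membership set and a scan over the five status names in fixed descending-priority order, falling back to the first cleaned status when none is recognized (max's first-element behavior on all-zero keys).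
import Mathlib
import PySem

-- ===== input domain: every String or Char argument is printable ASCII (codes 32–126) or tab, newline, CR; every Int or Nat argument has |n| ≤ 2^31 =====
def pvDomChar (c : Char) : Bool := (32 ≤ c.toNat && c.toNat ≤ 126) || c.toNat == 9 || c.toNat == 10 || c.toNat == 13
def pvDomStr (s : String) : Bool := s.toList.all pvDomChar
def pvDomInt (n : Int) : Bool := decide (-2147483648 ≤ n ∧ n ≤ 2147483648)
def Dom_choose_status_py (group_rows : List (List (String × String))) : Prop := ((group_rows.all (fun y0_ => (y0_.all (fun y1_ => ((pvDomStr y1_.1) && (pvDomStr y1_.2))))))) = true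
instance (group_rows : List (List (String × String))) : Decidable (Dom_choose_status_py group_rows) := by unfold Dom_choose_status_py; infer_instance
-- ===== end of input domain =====

-- B replaces the priority dict + max(key=...) with one cleaning pass, a membership set and a scan
-- over the five names in fixed descending-priority order (idiomatic; same complexity).

-- ===== PORT A =====
-- _clean_string(value): value is None → None; otherwise strip, empty → None
def pvCleanA (value : Option String) : Option String :=
  match value with
  | none => none
  | some s =>
    let text := PySem.Str.strip s
    if text = "" then none else some text

-- the `priorities` dict literal
def pvPriorities : PySem.Dict String Int :=
  PySem.Dict.ofList [("Cancelled", 5), ("Delayed", 4), ("Boarding", 3), ("On Time", 2), ("Departed", 1)]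

-- the lambda key: priorities.get(status, 0)
def pvKeyA (status : String) : Int := pvPriorities.getD status 0

def choose_status_py (group_rows : List (List (String × String))) : Option String :=
  let statuses := group_rows.map (fun row => pvCleanA (List.lookup "status" row))
  let statuses2 := statuses.filterMap (fun status =>
    match status with
    | none => none
    | some t => if t = "" then none else some t)  -- Python truthiness filter on str | None
  if statuses2 = [] then none
  else PySem.List.max? statuses2 pvKeyA

-- ===== PORT B =====
-- B's per-row cleaning: row.get("status"); skip None; strip; skip empty
def pvCleanB (row : List (String × String)) : Option String :=
  match List.lookup "status" row with
  | none => none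
  | some value =>
    let text := PySem.Str.strip value
    if text = "" then none else some text

def pvNames : List String := ["Cancelled", "Delayed", "Boarding", "On Time", "Departed"]

def choose_status_py_alt (group_rows : List (List (String × String))) : Option String :=
  let statuses := group_rows.filterMap pvCleanB
  match statuses with
  | [] => none
  | s0 :: _ =>
    let present := PySem.Set.ofList statuses
    match pvNames.find? (fun name => present.contains name) with
    | some name => some name
    | none => some s0

-- ===== PRECONDITION & SPEC =====
def Spec_choose_status_py (group_rows : List (List (String × String))) (out : Option String) : Prop := out = choose_status_py_alt group_rows
instance (group_rows : List (List (String × String))) (out : Option String) : Decidable (Spec_choose_status_py group_rows out) := by unfold Spec_choose_status_py; infer_instance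

-- ===== CLAIM (what is proved, stated in full; the proofs are below) =====
def Claim_equal_choose_status_py : Prop := ∀ (group_rows : List (List (String × String))), Dom_choose_status_py group_rows → Spec_choose_status_py group_rows (choose_status_py group_rows)

-- ===== LEMMAS AND PROOFS =====

-- the two cleaning pipelines produce the same statuses list
theorem pvStatuses_eq (rows : List (List (String × String))) :
    (rows.map (fun row => pvCleanA (List.lookup "status" row))).filterMap (fun status =>
      match status with
      | none => none
      | some t => if t = "" then none else some t) = rows.filterMap pvCleanB := by
  rw [List.filterMap_map]
  refine List.filterMap_congr (fun row _ => ?_)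
  simp only [Function.comp, pvCleanA, pvCleanB]
  cases List.lookup "status" row with
  | none => rfl
  | some s => by_cases h : PySem.Str.strip s = "" <;> simp [h]

-- closed form of the key function
theorem pvKeyA_char (s : String) :
    pvKeyA s = if s = "Cancelled" then 5 else if s = "Delayed" then 4 else
      if s = "Boarding" then 3 else if s = "On Time" then 2 else
      if s = "Departed" then 1 else 0 := by
  have h : pvPriorities = PySem.Dict.mk [("Cancelled", 5), ("Delayed", 4), ("Boarding", 3), ("On Time", 2), ("Departed", 1)] := by decide
  simp only [pvKeyA, h, PySem.Dict.getD, PySem.Dict.get?_mk_cons, beq_iff_eq]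
  split_ifs with h1 h2 h3 h4 h5 <;> first | rfl | (subst_vars; simp_all)

theorem pvFoldlConst (f : Option String → String → Option String) (l : List String) (a : String)
    (h : ∀ y ∈ l, f (some a) y = some a) : l.foldl f (some a) = some a := by
  induction l with
  | nil => rfl
  | cons y l ih => rw [List.foldl_cons, h y (by simp)]; exact ih (fun z hz => h z (by simp [hz]))

theorem pvMax_eq_scan (s0 : String) (t : List String) :
    PySem.List.max? (s0 :: t) pvKeyA =
      match pvNames.find? (fun name => (PySem.Set.ofList (s0 :: t)).contains name) with
      | some name => some name
      | none => some s0 := by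
  have hcont : ∀ n : String, ((PySem.Set.ofList (s0 :: t)).contains n) = decide (n ∈ s0 :: t) := by
    intro n; by_cases h : n ∈ s0 :: t <;> simp [h, PySem.Set.mem_ofList]
  have hsome : ∃ m, PySem.List.max? (s0 :: t) pvKeyA = some m := by
    cases hmm : PySem.List.max? (s0 :: t) pvKeyA
    · exact absurd ((PySem.List.max?_eq_none_iff _ _).mp hmm) (by simp)
    · exact ⟨_, rfl⟩
  by_cases h1 : "Cancelled" ∈ s0 :: t
  case pos =>
    have b1 : (decide ("Cancelled" = s0) || decide ("Cancelled" ∈ t)) = true := by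
      simpa [List.mem_cons] using h1
    rw [show pvNames.find? (fun n => (PySem.Set.ofList (s0 :: t)).contains n) = some "Cancelled" from by
      simp [pvNames, b1]]
    obtain ⟨m, hm⟩ := hsome
    have hmem := PySem.List.max?_mem hm
    have hge : (5:Int) ≤ pvKeyA m := by
      have := PySem.List.max?_isMax hm _ h1; rw [pvKeyA_char] at this; simpa using this
    have hkm := pvKeyA_char m
    rw [hm]; congr 1
    split_ifs at hkm with e1 e2 e3 e4 e5 <;> first | assumption | (exfalso; omega)
  case neg =>
  have b1 : (decide ("Cancelled" = s0) || decide ("Cancelled" ∈ t)) = false := by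
    simp [List.mem_cons, not_or] at h1; simp [h1.1, h1.2]
  by_cases h2 : "Delayed" ∈ s0 :: t
  case pos =>
    have b2 : (decide ("Delayed" = s0) || decide ("Delayed" ∈ t)) = true := by
      simpa [List.mem_cons] using h2
    rw [show pvNames.find? (fun n => (PySem.Set.ofList (s0 :: t)).contains n) = some "Delayed" from by
      simp [pvNames, b1, b2]]
    obtain ⟨m, hm⟩ := hsome
    have hmem := PySem.List.max?_mem hm
    have hge : (4:Int) ≤ pvKeyA m := by
      have := PySem.List.max?_isMax hm _ h2; rw [pvKeyA_char] at this; simpa using this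
    have hkm := pvKeyA_char m
    rw [hm]; congr 1
    split_ifs at hkm with e1 e2 e3 e4 e5 <;>
      first | assumption | (subst_vars; exact absurd hmem (by assumption)) | (exfalso; omega)
  case neg =>
  have b2 : (decide ("Delayed" = s0) || decide ("Delayed" ∈ t)) = false := by
    simp [List.mem_cons, not_or] at h2; simp [h2.1, h2.2]
  by_cases h3 : "Boarding" ∈ s0 :: t
  case pos =>
    have b3 : (decide ("Boarding" = s0) || decide ("Boarding" ∈ t)) = true := by
      simpa [List.mem_cons] using h3
    rw [show pvNames.find? (fun n => (PySem.Set.ofList (s0 :: t)).contains n) = some "Boarding" from by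
      simp [pvNames, b1, b2, b3]]
    obtain ⟨m, hm⟩ := hsome
    have hmem := PySem.List.max?_mem hm
    have hge : (3:Int) ≤ pvKeyA m := by
      have := PySem.List.max?_isMax hm _ h3; rw [pvKeyA_char] at this; simpa using this
    have hkm := pvKeyA_char m
    rw [hm]; congr 1
    split_ifs at hkm with e1 e2 e3 e4 e5 <;>
      first | assumption | (subst_vars; exact absurd hmem (by assumption)) | (exfalso; omega)
  case neg =>
  have b3 : (decide ("Boarding" = s0) || decide ("Boarding" ∈ t)) = false := by
    simp [List.mem_cons, not_or] at h3; simp [h3.1, h3.2]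
  by_cases h4 : "On Time" ∈ s0 :: t
  case pos =>
    have b4 : (decide ("On Time" = s0) || decide ("On Time" ∈ t)) = true := by
      simpa [List.mem_cons] using h4
    rw [show pvNames.find? (fun n => (PySem.Set.ofList (s0 :: t)).contains n) = some "On Time" from by
      simp [pvNames, b1, b2, b3, b4]]
    obtain ⟨m, hm⟩ := hsome
    have hmem := PySem.List.max?_mem hm
    have hge : (2:Int) ≤ pvKeyA m := by
      have := PySem.List.max?_isMax hm _ h4; rw [pvKeyA_char] at this; simpa using this
    have hkm := pvKeyA_char m
    rw [hm]; congr 1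
    split_ifs at hkm with e1 e2 e3 e4 e5 <;>
      first | assumption | (subst_vars; exact absurd hmem (by assumption)) | (exfalso; omega)
  case neg =>
  have b4 : (decide ("On Time" = s0) || decide ("On Time" ∈ t)) = false := by
    simp [List.mem_cons, not_or] at h4; simp [h4.1, h4.2]
  by_cases h5 : "Departed" ∈ s0 :: t
  case pos =>
    have b5 : (decide ("Departed" = s0) || decide ("Departed" ∈ t)) = true := by
      simpa [List.mem_cons] using h5
    rw [show pvNames.find? (fun n => (PySem.Set.ofList (s0 :: t)).contains n) = some "Departed" from by
      simp [pvNames, b1, b2, b3, b4, b5]]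
    obtain ⟨m, hm⟩ := hsome
    have hmem := PySem.List.max?_mem hm
    have hge : (1:Int) ≤ pvKeyA m := by
      have := PySem.List.max?_isMax hm _ h5; rw [pvKeyA_char] at this; simpa using this
    have hkm := pvKeyA_char m
    rw [hm]; congr 1
    split_ifs at hkm with e1 e2 e3 e4 e5 <;>
      first | assumption | (subst_vars; exact absurd hmem (by assumption)) | (exfalso; omega)
  case neg =>
  have b5 : (decide ("Departed" = s0) || decide ("Departed" ∈ t)) = false := by
    simp [List.mem_cons, not_or] at h5; simp [h5.1, h5.2]
  rw [show pvNames.find? (fun n => (PySem.Set.ofList (s0 :: t)).contains n) = none from by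
    simp [pvNames, b1, b2, b3, b4, b5]]
  have hz : ∀ y ∈ s0 :: t, pvKeyA y ≤ pvKeyA s0 := by
    intro y hy
    have h0 : pvKeyA y = 0 := by
      rw [pvKeyA_char]; split_ifs with e1 e2 e3 e4 e5 <;> first | rfl | (subst_vars; simp_all)
    have h0' : pvKeyA s0 = 0 := by
      rw [pvKeyA_char]; split_ifs with e1 e2 e3 e4 e5 <;> first | rfl | (subst_vars; simp_all)
    omega
  show PySem.List.max? (s0 :: t) pvKeyA = some s0
  simp only [PySem.List.max?, List.foldl_cons]
  refine pvFoldlConst _ t s0 (fun y hy => ?_)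
  exact if_neg (not_lt.mpr (hz y (by simp [hy])))

-- ===== VERDICT (by name: the statement is the Claim_ definition above) =====
theorem choose_status_py_spec : Claim_equal_choose_status_py := by
  intro rows _
  unfold Spec_choose_status_py choose_status_py choose_status_py_alt
  simp only [pvStatuses_eq]
  cases h : rows.filterMap pvCleanB with
  | nil => simp
  | cons s0 t => simp only [if_neg (by simp : ¬ (s0 :: t = []))]; exact pvMax_eq_scan s0 t
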